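-- pv_equiv track=rewrite | github.com/aymara/verbenet-editor | syntacticframes_project/loadmapping/verbnetframe.py | _strip_leftpart_keywords
-- ===== SOURCE A (Python) =====
-- def _strip_leftpart_keywords(sentence):
--     result = []
--     found_verb = False
--     for elem in sentence:
--         if elem == "V": found_verb = True
--         if found_verb or elem[0].isupper():
--             result.append(elem)
--
--     return result
-- ===== SOURCE B (Python) =====
-- def _strip_leftpart_keywords(sentence):
--     if "V" in sentence:
--         i = sentence.index("V")
--         return [e for e in sentence[:i] if e[0].isupper()] + list(sentence[i:])
--     return [e for e in sentence if e[0].isupper()]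
-- ===== Notes on version B (the rewrite author's own statement) =====
-- stated objective: alternative
-- what changed: Replaces the latched single-pass boolean-flag scan with locating the first "V" via index() and then filtering only the prefix by capitalization while copying the suffix verbatim.
import Mathlib
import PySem

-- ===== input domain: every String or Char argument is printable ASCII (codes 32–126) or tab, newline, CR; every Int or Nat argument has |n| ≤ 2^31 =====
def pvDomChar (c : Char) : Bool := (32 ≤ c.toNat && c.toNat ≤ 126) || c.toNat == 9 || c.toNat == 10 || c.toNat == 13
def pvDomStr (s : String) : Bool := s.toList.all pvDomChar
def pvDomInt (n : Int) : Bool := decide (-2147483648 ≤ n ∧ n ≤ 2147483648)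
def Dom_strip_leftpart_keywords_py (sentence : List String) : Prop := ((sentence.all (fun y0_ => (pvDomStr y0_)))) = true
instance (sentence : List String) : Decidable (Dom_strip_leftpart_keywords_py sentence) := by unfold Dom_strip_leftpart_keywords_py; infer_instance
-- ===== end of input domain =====

-- B locates the first "V" with index() and filters only the prefix, copying the suffix
-- verbatim, instead of A's single latched-flag scan; same O(n) cost, different decomposition.

-- ===== PORT A =====
-- loop body of A: latch found_verb on "V", keep elem if found_verb or elem[0].isupper()
-- (elem[0] ported as pyGetD … 0 ' ': Pre_ guarantees elem ≠ "" whenever it is evaluated)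
def pvStepA (st : List String × Bool) (elem : String) : List String × Bool :=
  let fv := st.2 || (elem == "V")
  if fv || PySem.Chars.isupper (PySem.List.pyGetD elem.toList 0 ' ')
  then (st.1 ++ [elem], fv) else (st.1, fv)

def strip_leftpart_keywords_py (sentence : List String) : List String :=
  (sentence.foldl pvStepA ([], false)).1

-- ===== PORT B =====
def pvUpperHead (e : String) : Bool :=
  PySem.Chars.isupper (PySem.List.pyGetD e.toList 0 ' ')

def strip_leftpart_keywords_py_alt (sentence : List String) : List String :=
  match PySem.List.index? sentence "V" with
  | some i =>
      (PySem.List.slice sentence none (some (i : Int))).filter pvUpperHead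
        ++ PySem.List.slice sentence (some (i : Int)) none
  | none => sentence.filter pvUpperHead

-- ===== PRECONDITION & SPEC =====
-- Pre_ excludes exactly the inputs on which Python A raises IndexError: an empty string
-- occurring before the first "V" (or anywhere, if there is no "V").
def Pre_strip_leftpart_keywords_py (sentence : List String) : Prop :=
  "" ∉ sentence.takeWhile (fun e => e ≠ "V")
instance (sentence : List String) : Decidable (Pre_strip_leftpart_keywords_py sentence) := by
  unfold Pre_strip_leftpart_keywords_py; infer_instance

def pvWitness_strip_leftpart_keywords_py : List String := ["Ab", "xy", "V", ""]

def Spec_strip_leftpart_keywords_py (sentence : List String) (out : List String) : Prop := out = strip_leftpart_keywords_py_alt sentence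
instance (sentence : List String) (out : List String) : Decidable (Spec_strip_leftpart_keywords_py sentence out) := by unfold Spec_strip_leftpart_keywords_py; infer_instance

-- ===== CLAIM (what is proved, stated in full; the proofs are below) =====
def Claim_equal_strip_leftpart_keywords_py : Prop := ∀ (sentence : List String), Dom_strip_leftpart_keywords_py sentence → Pre_strip_leftpart_keywords_py sentence → Spec_strip_leftpart_keywords_py sentence (strip_leftpart_keywords_py sentence)

-- ===== LEMMAS AND PROOFS =====

-- once found_verb is latched, A's fold appends every remaining element
theorem pvFoldA_true (l : List String) (acc : List String) :
    l.foldl pvStepA (acc, true) = (acc ++ l, true) := by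
  induction l generalizing acc with
  | nil => simp
  | cons e l ih => simp [pvStepA, ih]

-- B on a list starting with "V" returns it unchanged
theorem pvAlt_cons_V (l : List String) :
    strip_leftpart_keywords_py_alt ("V" :: l) = "V" :: l := by
  unfold strip_leftpart_keywords_py_alt
  rw [PySem.List.index?_cons_self]
  simp [PySem.List.slice_to, PySem.List.slice_from]

-- B commutes with cons of a non-"V" head
theorem pvAlt_cons (e : String) (l : List String) (he : e ≠ "V") :
    strip_leftpart_keywords_py_alt (e :: l) =
      if pvUpperHead e then e :: strip_leftpart_keywords_py_alt l
      else strip_leftpart_keywords_py_alt l := by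
  unfold strip_leftpart_keywords_py_alt
  rw [PySem.List.index?_cons_of_ne _ he]
  cases h : PySem.List.index? l "V" with
  | none => simp [List.filter_cons]
  | some i =>
      simp only [Option.map_some, PySem.List.slice_to_natCast, PySem.List.slice_from_natCast,
        List.take_succ_cons, List.drop_succ_cons, List.filter_cons]
      split <;> simp

-- the main correspondence, with the accumulator generalized
theorem pvMain (l : List String) (acc : List String)
    (hpre : "" ∉ l.takeWhile (fun e => e ≠ "V")) :
    (l.foldl pvStepA (acc, false)).1 = acc ++ strip_leftpart_keywords_py_alt l := by
  induction l generalizing acc with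
  | nil => simp [strip_leftpart_keywords_py_alt, PySem.List.index?]
  | cons e l ih =>
      by_cases he : e = "V"
      · subst he
        have hstep : pvStepA (acc, false) "V" = (acc ++ ["V"], true) := by simp [pvStepA]
        rw [List.foldl_cons, hstep, pvFoldA_true, pvAlt_cons_V]
        simp
      · have hpre' : "" ∉ l.takeWhile (fun e => e ≠ "V") := by
          rw [List.takeWhile_cons_of_pos (by simp [he])] at hpre
          exact fun h => hpre (List.mem_cons_of_mem _ h)
        have hbe : (e == "V") = false := by simp [he]
        simp only [List.foldl_cons, pvStepA, hbe, Bool.false_or]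
        rw [pvAlt_cons e l he]
        by_cases hu : pvUpperHead e
        · rw [if_pos (by simpa [pvUpperHead] using hu), if_pos hu, ih _ hpre']
          simp
        · rw [if_neg (by simpa [pvUpperHead] using hu), if_neg hu, ih _ hpre']

-- ===== VERDICT (by name: the statement is the Claim_ definition above) =====
theorem strip_leftpart_keywords_py_spec : Claim_equal_strip_leftpart_keywords_py := by
  intro sentence _ hpre
  unfold Spec_strip_leftpart_keywords_py strip_leftpart_keywords_py
  simpa using pvMain sentence [] hpre
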